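-- pv_equiv track=rewrite | github.com/myeolinmalchi/PNUME-Capstone-1 | m1s/utils/wrappers.py | ignore_dim_with_zero
-- ===== SOURCE A (Python) =====
-- def ignore_dim_with_zero(_shape, _shape_target):
--     _shape = list(_shape)
--     _shape_target = list(_shape_target)
--     for _ in range(_shape.count(1)):
--         _shape.remove(1)
--     for _ in range(_shape_target.count(1)):
--         _shape_target.remove(1)
--     if _shape == _shape_target:
--         return True
--     else:
--         return False
-- ===== SOURCE B (Python) =====
-- def ignore_dim_with_zero(_shape, _shape_target):
--     xs = list(_shape)
--     ys = list(_shape_target)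
--     i = j = 0
--     n, m = len(xs), len(ys)
--     while True:
--         while i < n and xs[i] == 1:
--             i += 1
--         while j < m and ys[j] == 1:
--             j += 1
--         if i < n and j < m:
--             if xs[i] != ys[j]:
--                 return False
--             i += 1
--             j += 1
--         else:
--             return i == n and j == m
-- ===== Notes on version B (the rewrite author's own statement) =====
-- stated objective: alternative
-- what changed: Replaces A's repeated list.remove(1) passes plus final list comparison with a single interleaved two-cursor walk that skips 1s and compares remaining dims in place, building no intermediate lists.
import Mathlib
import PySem

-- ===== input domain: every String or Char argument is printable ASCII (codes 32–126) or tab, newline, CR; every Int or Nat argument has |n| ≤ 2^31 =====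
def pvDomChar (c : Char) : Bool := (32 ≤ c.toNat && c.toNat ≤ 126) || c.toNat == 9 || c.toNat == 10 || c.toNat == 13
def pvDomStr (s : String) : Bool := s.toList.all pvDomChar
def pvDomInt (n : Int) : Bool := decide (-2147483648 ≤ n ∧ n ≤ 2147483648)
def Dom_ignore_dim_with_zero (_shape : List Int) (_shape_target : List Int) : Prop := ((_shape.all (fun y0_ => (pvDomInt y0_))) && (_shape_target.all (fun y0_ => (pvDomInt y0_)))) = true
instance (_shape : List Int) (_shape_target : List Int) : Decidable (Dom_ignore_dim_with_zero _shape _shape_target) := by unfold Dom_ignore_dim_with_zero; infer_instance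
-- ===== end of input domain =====

-- B replaces A's repeated list.remove(1) passes and final list comparison with one
-- interleaved two-cursor walk that skips 1s and compares the remaining dims in place.

-- ===== PORT A =====
-- 'for _ in range(count): _shape.remove(1)'; remove(1) never raises here because the
-- loop runs exactly count(1) times, so .getD is only a totalisation, never taken as none.
def pvRemoveOnes (n : Int) (l : List Int) : List Int :=
  (PySem.List.pyRange 0 n 1).foldl (fun acc _ => (PySem.List.remove? acc 1).getD acc) l

def ignore_dim_with_zero (_shape : List Int) (_shape_target : List Int) : Bool :=
  let s := pvRemoveOnes (PySem.List.count _shape 1 : Nat) _shape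
  let t := pvRemoveOnes (PySem.List.count _shape_target 1 : Nat) _shape_target
  if s == t then true else false

-- ===== PORT B =====
-- the two inner 'while xs[i] == 1: i += 1' loops: advance a cursor past 1s
def pvSkipOnes : List Int → List Int
  | [] => []
  | x :: xs => if x == 1 then pvSkipOnes xs else x :: xs

theorem pvSkipOnes_length_le : ∀ l : List Int, (pvSkipOnes l).length ≤ l.length := by
  intro l; induction l with
  | nil => simp [pvSkipOnes]
  | cons x xs ih => simp only [pvSkipOnes]; split <;> simp <;> omega

-- the outer 'while True' loop: skip 1s on both sides, then compare current dims
def ignore_dim_with_zero_alt (_shape : List Int) (_shape_target : List Int) : Bool :=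
  match h1 : pvSkipOnes _shape, h2 : pvSkipOnes _shape_target with
  | a :: as, b :: bs => a == b && ignore_dim_with_zero_alt as bs
  | [], [] => true
  | _, _ => false
termination_by _shape.length + _shape_target.length
decreasing_by
  have ha := pvSkipOnes_length_le _shape
  have hb := pvSkipOnes_length_le _shape_target
  rw [h1] at ha; rw [h2] at hb; simp at ha hb; omega

-- ===== PRECONDITION & SPEC =====
def Spec_ignore_dim_with_zero (_shape : List Int) (_shape_target : List Int) (out : Bool) : Prop := out = ignore_dim_with_zero_alt _shape _shape_target
instance (_shape : List Int) (_shape_target : List Int) (out : Bool) : Decidable (Spec_ignore_dim_with_zero _shape _shape_target out) := by unfold Spec_ignore_dim_with_zero; infer_instance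

-- ===== CLAIM (what is proved, stated in full; the proofs are below) =====
def Claim_equal_ignore_dim_with_zero : Prop := ∀ (_shape : List Int) (_shape_target : List Int), Dom_ignore_dim_with_zero _shape _shape_target → Spec_ignore_dim_with_zero _shape _shape_target (ignore_dim_with_zero _shape _shape_target)

-- ===== LEMMAS AND PROOFS =====

-- the filter both programs effectively compute
def pvF (l : List Int) : List Int := l.filter (fun x => x ≠ 1)

theorem pvF_skipOnes (l : List Int) : pvF (pvSkipOnes l) = pvF l := by
  induction l with
  | nil => rfl
  | cons x xs ih =>
    simp only [pvSkipOnes]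
    by_cases hx : x = 1
    · simpa [hx, pvF] using ih
    · simp [hx]

theorem pvSkipOnes_head_ne (l : List Int) (a : Int) (as : List Int)
    (h : pvSkipOnes l = a :: as) : a ≠ 1 := by
  induction l with
  | nil => simp [pvSkipOnes] at h
  | cons x xs ih =>
    simp only [pvSkipOnes] at h
    by_cases hx : x = 1
    · simp [hx] at h; exact ih h
    · simp [hx] at h; omega

theorem pvF_eq_nil (l : List Int) (h : pvSkipOnes l = []) : pvF l = [] := by
  have hx := pvF_skipOnes l
  rw [h] at hx
  simp [pvF] at hx ⊢
  intro a ha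
  simpa using hx a ha

theorem pvF_eq_cons (l : List Int) (a : Int) (as : List Int) (h : pvSkipOnes l = a :: as) :
    pvF l = a :: pvF as := by
  have ha := pvSkipOnes_head_ne l a as h
  have hx := pvF_skipOnes l
  rw [h] at hx
  simp only [pvF, List.filter_cons] at hx
  rw [if_pos (by simp [ha])] at hx
  simp only [pvF]
  exact hx.symm

-- B computes the comparison of the non-1 subsequences
theorem alt_eq_filter (xs ys : List Int) :
    ignore_dim_with_zero_alt xs ys = (pvF xs == pvF ys) := by
  fun_induction ignore_dim_with_zero_alt xs ys with
  | case1 xs ys a as b bs h1 h2 ih =>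
    rw [ih, pvF_eq_cons xs a as h1, pvF_eq_cons ys b bs h2]
    simp [List.cons_beq_cons]
  | case2 xs ys h1 h2 =>
    rw [pvF_eq_nil xs h1, pvF_eq_nil ys h2]
    simp
  | case3 xs ys h1 h2 =>
    rcases e1 : pvSkipOnes xs with _ | ⟨a, as⟩ <;> rcases e2 : pvSkipOnes ys with _ | ⟨b, bs⟩
    · exact (h2 e1 e2).elim
    · rw [pvF_eq_nil xs e1, pvF_eq_cons ys b bs e2]; simp
    · rw [pvF_eq_cons xs a as e1, pvF_eq_nil ys e2]; simp
    · exact absurd (h1 a as b bs e1 e2) (by simp)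

-- one A-removal pass with a non-1 head commutes past the head
theorem remove_step_cons (x : Int) (hx : x ≠ 1) (l : List Int) (hl : (1:Int) ∈ l) :
    (PySem.List.remove? (x :: l) 1).getD (x :: l) = x :: (PySem.List.remove? l 1).getD l := by
  rw [PySem.List.remove?_cons_of_ne l hx]
  rw [PySem.List.remove?_eq_some_erase l 1 hl]
  rfl

-- folding the removal step over any index list is just iterating it
theorem foldl_const_iterate (f : List Int → List Int) :
    ∀ (r : List Int) (l : List Int),
      r.foldl (fun acc _ => f acc) l = f^[r.length] l := by
  intro r; induction r with
  | nil => intro l; simp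
  | cons a as ih => intro l; simp [List.foldl_cons, ih, Function.iterate_succ_apply]

theorem iterate_remove_count : ∀ (l : List Int),
    (fun acc => (PySem.List.remove? acc 1).getD acc)^[l.count 1] l = pvF l := by
  intro l
  induction l with
  | nil => simp [pvF]
  | cons x xs ih =>
    by_cases hx : x = 1
    · subst hx
      rw [List.count_cons_self, Function.iterate_succ_apply]
      simp only [PySem.List.remove?_cons_self, Option.getD_some]
      rw [ih]; simp [pvF]
    · rw [List.count_cons_of_ne (by omega)]
      have step : ∀ (n : Nat) (xs : List Int), n ≤ xs.count 1 →
          (fun acc => (PySem.List.remove? acc 1).getD acc)^[n] (x :: xs) =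
            x :: (fun acc => (PySem.List.remove? acc 1).getD acc)^[n] xs := by
        intro n
        induction n with
        | zero => intro xs _; simp
        | succ m ihm =>
          intro xs hn
          have hmem : (1:Int) ∈ xs := List.count_pos_iff.mp (by omega)
          rw [Function.iterate_succ_apply, Function.iterate_succ_apply]
          have h1 : (PySem.List.remove? (x :: xs) 1).getD (x :: xs) = x :: xs.erase 1 := by
            rw [remove_step_cons x hx xs hmem, PySem.List.remove?_eq_some_erase xs 1 hmem]
            rfl
          have h2 : (PySem.List.remove? xs 1).getD xs = xs.erase 1 := by
            rw [PySem.List.remove?_eq_some_erase xs 1 hmem]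
            rfl
          rw [h1, h2]
          exact ihm _ (by rw [List.count_erase_self]; omega)
      rw [step _ _ (le_refl _), ih]
      simp [pvF, hx]

theorem removeOnes_eq_filter (l : List Int) :
    pvRemoveOnes ((PySem.List.count l 1 : Nat) : Int) l = pvF l := by
  unfold pvRemoveOnes
  rw [foldl_const_iterate, PySem.List.length_pyRange_one]
  have hn : (((PySem.List.count l 1 : Nat) : Int) - 0).toNat = l.count 1 := by
    rw [PySem.List.count_eq]; omega
  rw [hn]
  exact iterate_remove_count l

theorem a_eq_filter (xs ys : List Int) :
    ignore_dim_with_zero xs ys = (pvF xs == pvF ys) := by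
  unfold ignore_dim_with_zero
  rw [removeOnes_eq_filter, removeOnes_eq_filter]
  by_cases h : pvF xs = pvF ys <;> simp [h]

-- ===== VERDICT (by name: the statement is the Claim_ definition above) =====
theorem ignore_dim_with_zero_spec : Claim_equal_ignore_dim_with_zero := by
  intro xs ys _
  unfold Spec_ignore_dim_with_zero
  rw [a_eq_filter, alt_eq_filter]
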